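-- pv_equiv track=rewrite | github.com/dachai1985/study | test-interview.py | balance_sorted
-- ===== SOURCE A (Python) =====
-- def balance_sorted(sorted_list):
--     if not sorted_list:
--         return [], []
--     big = sorted_list[-1]
--     small = sorted_list[-2]
--     list1, list2 = balance_sorted(sorted_list[:-2])
--     list1.append(small)
--     list2.append(big)
--     if sum(list1) > sum(list2):
--         return list1, list2
--     else:
--         return list2, list1
-- ===== SOURCE B (Python) =====
-- def balance_sorted(sorted_list):
--     list1, list2 = [], []
--     sum1 = sum2 = 0
--     for i in range(0, len(sorted_list), 2):
--         small = sorted_list[i]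
--         big = sorted_list[i + 1]
--         list1.append(small)
--         sum1 += small
--         list2.append(big)
--         sum2 += big
--         if sum1 <= sum2:
--             list1, list2 = list2, list1
--             sum1, sum2 = sum2, sum1
--     return list1, list2
-- ===== Notes on version B (the rewrite author's own statement) =====
-- stated objective: alternative
-- what changed: A recursively slices two elements off the end and re-sums both result lists at every level; B is a single front-to-back loop over index pairs that keeps running sums, appending and swapping in O(1) per pair.
import Mathlib
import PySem

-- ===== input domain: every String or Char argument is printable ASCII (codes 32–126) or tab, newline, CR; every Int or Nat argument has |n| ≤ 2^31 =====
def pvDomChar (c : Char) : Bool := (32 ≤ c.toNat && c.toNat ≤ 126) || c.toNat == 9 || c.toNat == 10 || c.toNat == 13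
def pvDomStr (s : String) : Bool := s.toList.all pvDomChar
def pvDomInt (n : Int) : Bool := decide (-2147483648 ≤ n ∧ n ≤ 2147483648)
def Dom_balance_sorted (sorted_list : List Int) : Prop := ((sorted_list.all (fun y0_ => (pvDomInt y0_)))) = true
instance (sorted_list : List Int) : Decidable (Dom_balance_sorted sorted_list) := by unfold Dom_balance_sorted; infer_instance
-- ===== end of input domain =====

-- B replaces A's end-slicing recursion (re-summing both result lists at every level) by a single
-- front-to-back loop over index pairs with running sums; return value proved equal on even-length
-- lists (on odd length both A and B raise IndexError, excluded by Pre_).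

-- ===== PORT A =====
def balance_sorted (sorted_list : List Int) : List Int × List Int :=
  if _h : sorted_list = [] then ([], [])
  else
    match PySem.List.pyGet? sorted_list (-1), PySem.List.pyGet? sorted_list (-2) with
    | some big, some small =>
      let p := balance_sorted (PySem.List.slice sorted_list none (some (-2)))
      let list1 := p.1 ++ [small]
      let list2 := p.2 ++ [big]
      if list1.sum > list2.sum then (list1, list2) else (list2, list1)
    | _, _ => ([], [])  -- sorted_list[-2] raises IndexError here (singleton list); excluded by Pre_
termination_by sorted_list.length
decreasing_by
  rw [PySem.List.slice_to_neg_ofNat sorted_list 2 (by omega)]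
  have hne : sorted_list.length ≠ 0 := by simpa [List.length_eq_zero_iff] using _h
  simp [List.length_take]; omega

-- ===== PORT B =====
-- loop body of Source B: state (list1, list2, sum1, sum2); sorted_list[i+1] raises IndexError on odd
-- length (excluded by Pre_), so inside Pre_ the default of pyGetD is never used
def bstep (xs : List Int) (st : List Int × List Int × Int × Int) (i : Int) : List Int × List Int × Int × Int :=
  let small := PySem.List.pyGetD xs i 0
  let big := PySem.List.pyGetD xs (i + 1) 0
  let l1 := st.1 ++ [small]
  let s1 := st.2.2.1 + small
  let l2 := st.2.1 ++ [big]
  let s2 := st.2.2.2 + big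
  if s1 ≤ s2 then (l2, l1, s2, s1) else (l1, l2, s1, s2)

def balance_sorted_alt (sorted_list : List Int) : List Int × List Int :=
  let st := (PySem.List.pyRange 0 (sorted_list.length : Int) 2).foldl (bstep sorted_list) ([], [], 0, 0)
  (st.1, st.2.1)

-- ===== PRECONDITION & SPEC =====
-- A strips two elements per recursion level, so on odd-length input it reaches a singleton and
-- sorted_list[-2] raises IndexError; Pre_ admits exactly the even-length lists, where A returns.
def Pre_balance_sorted (sorted_list : List Int) : Prop := sorted_list.length % 2 = 0
instance (sorted_list : List Int) : Decidable (Pre_balance_sorted sorted_list) := by unfold Pre_balance_sorted; infer_instance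
def pvWitness_balance_sorted : List Int := [1, 2, 3, 4]

def Spec_balance_sorted (sorted_list : List Int) (out : List Int × List Int) : Prop := out = balance_sorted_alt sorted_list
instance (sorted_list : List Int) (out : List Int × List Int) : Decidable (Spec_balance_sorted sorted_list out) := by unfold Spec_balance_sorted; infer_instance

-- ===== CLAIM (what is proved, stated in full; the proofs are below) =====
def Claim_equal_balance_sorted : Prop := ∀ (sorted_list : List Int), Dom_balance_sorted sorted_list → Pre_balance_sorted sorted_list → Spec_balance_sorted sorted_list (balance_sorted sorted_list)

-- ===== LEMMAS AND PROOFS =====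

-- the even-index list Source B's range(0, len, 2) walks, in closed form
lemma pyRange_even (m : Nat) :
    PySem.List.pyRange 0 (2 * (m : Int)) 2 = (List.range m).map (fun k : Nat => 2 * (k : Int)) := by
  rw [PySem.List.pyRange_of_pos 0 (2 * (m : Int)) (by omega)]
  rcases Nat.eq_zero_or_pos m with hm | hm
  · subst hm; simp
  · have h1 : (0 : Int) < 2 * (m : Int) := by omega
    rw [if_pos h1]
    have h2 : ((2 * (m : Int) - 0 + 2 - 1) / 2).toNat = m := by omega
    rw [h2]
    simp

lemma pyGetD_append_left (ys zs : List Int) (j : Nat) (hj : j < ys.length) :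
    PySem.List.pyGetD (ys ++ zs) (j : Int) 0 = PySem.List.pyGetD ys (j : Int) 0 := by
  rw [PySem.List.pyGetD_eq_getElem (ys ++ zs) 0 (by omega) (by simp; omega),
      PySem.List.pyGetD_eq_getElem ys 0 (by omega) (by omega)]
  simp [List.getElem_append_left, hj]

-- core invariant: the fold of B computes A's two lists together with their running sums
lemma core_eq (m : Nat) : ∀ xs : List Int, xs.length = 2 * m →
    (PySem.List.pyRange 0 (xs.length : Int) 2).foldl (bstep xs) ([], [], 0, 0)
      = ((balance_sorted xs).1, (balance_sorted xs).2,
         (balance_sorted xs).1.sum, (balance_sorted xs).2.sum) := by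
  induction m with
  | zero =>
    intro xs hxs
    have : xs = [] := by simpa [List.length_eq_zero_iff] using hxs
    subst this
    simp [balance_sorted, PySem.List.pyRange]
  | succ m ih =>
    intro xs hxs
    -- split xs = ys ++ [a, b]
    obtain ⟨ys, a, b, rfl, hys⟩ : ∃ ys a b, xs = ys ++ [a, b] ∧ ys.length = 2 * m := by
      have h2 : (xs.drop (2 * m)).length = 2 := by simp; omega
      match hd : xs.drop (2 * m) with
      | [a, b] =>
        exact ⟨xs.take (2 * m), a, b, by rw [← hd, List.take_append_drop], by simp; omega⟩
      | [] | [_] | _ :: _ :: _ :: _ => simp [hd] at h2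
    have hlen : ((ys ++ [a, b]).length : Int) = 2 * ((m : Int) + 1) := by simp; omega
    -- the range gains exactly the index 2*m at the end
    have hrange : PySem.List.pyRange 0 ((ys ++ [a, b]).length : Int) 2
        = PySem.List.pyRange 0 (2 * (m : Int)) 2 ++ [2 * (m : Int)] := by
      rw [hlen]
      have : (2 : Int) * ((m : Int) + 1) = 2 * ((m + 1 : Nat) : Int) := by push_cast; ring
      rw [this, pyRange_even, pyRange_even, List.range_succ]
      simp
    -- on indices below ys.length the step reads only ys
    have hcongr : (PySem.List.pyRange 0 (2 * (m : Int)) 2).foldl (bstep (ys ++ [a, b])) ([], [], 0, 0)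
        = (PySem.List.pyRange 0 (2 * (m : Int)) 2).foldl (bstep ys) ([], [], 0, 0) := by
      apply PySem.List.foldl_congr_mem
      intro acc x hx
      rw [PySem.List.mem_pyRange_iff_of_pos (by omega)] at hx
      obtain ⟨hx1, hx2, k, hk⟩ := hx
      have hx' : x = 2 * k := by omega
      have hk0 : 0 ≤ k := by omega
      obtain ⟨j, rfl⟩ := Int.eq_ofNat_of_zero_le hk0
      unfold bstep
      have e1 : (2 * (j : Int)) = ((2 * j : Nat) : Int) := by push_cast; ring
      have e2 : ((2 * j : Nat) : Int) + 1 = ((2 * j + 1 : Nat) : Int) := by push_cast; ring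
      rw [hx', e1, e2, pyGetD_append_left ys [a, b] (2 * j) (by omega),
          pyGetD_append_left ys [a, b] (2 * j + 1) (by omega)]
    -- the final step reads a and b
    have ha : PySem.List.pyGetD (ys ++ [a, b]) (2 * (m : Int)) 0 = a := by
      have e : (2 * (m : Int)) = ((ys.length : Nat) : Int) := by omega
      rw [e]
      have : ys ++ [a, b] = ys ++ a :: [b] := rfl
      rw [this, PySem.List.pyGetD, PySem.List.pyGet?_append_length]
      rfl
    have hb : PySem.List.pyGetD (ys ++ [a, b]) (2 * (m : Int) + 1) 0 = b := by
      have e : (2 * (m : Int) + 1) = (((ys ++ [a]).length : Nat) : Int) := by simp; omega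
      rw [e]
      have : ys ++ [a, b] = (ys ++ [a]) ++ b :: [] := by simp
      rw [this, PySem.List.pyGetD, PySem.List.pyGet?_append_length]
      rfl
    -- unfold one layer of A at ys ++ [a, b]
    have hA : balance_sorted (ys ++ [a, b])
        = (if (balance_sorted ys).1.sum + a > (balance_sorted ys).2.sum + b
            then ((balance_sorted ys).1 ++ [a], (balance_sorted ys).2 ++ [b])
            else ((balance_sorted ys).2 ++ [b], (balance_sorted ys).1 ++ [a])) := by
      rw [balance_sorted]
      have hne : ¬ (ys ++ [a, b] = []) := by simp
      rw [dif_neg hne]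
      have hg1 : PySem.List.pyGet? (ys ++ [a, b]) (-1) = some b := by
        have : ys ++ [a, b] = (ys ++ [a]) ++ [b] := by simp
        rw [this, PySem.List.pyGet?_neg_one_append_singleton]
      have hg2 : PySem.List.pyGet? (ys ++ [a, b]) (-2) = some a := by
        rw [PySem.List.pyGet?_neg_ofNat (ys ++ [a, b]) 2 (by omega) (by simp)]
        have e : (ys ++ [a, b]).length - 2 = ys.length := by simp
        rw [e]
        simp
      rw [hg1, hg2]
      have hsl : PySem.List.slice (ys ++ [a, b]) none (some (-2)) = ys := by
        rw [PySem.List.slice_to_neg_ofNat (ys ++ [a, b]) 2 (by omega)]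
        have e : (ys ++ [a, b]).length - 2 = ys.length := by simp
        rw [e, List.take_left]
      rw [hsl]
      simp only [List.sum_append, List.sum_cons, List.sum_nil, add_zero]
    -- put everything together
    rw [hrange, List.foldl_append, hcongr]
    have e : (2 : Int) * (m : Int) = ((ys.length : Nat) : Int) := by omega
    rw [e, ih ys hys]
    simp only [List.foldl_cons, List.foldl_nil]
    rw [← e]
    simp only [bstep, ha, hb]
    rw [hA]
    by_cases hc : (balance_sorted ys).1.sum + a > (balance_sorted ys).2.sum + b
    · rw [if_pos hc, if_neg (by omega)]
      simp [List.sum_append]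
    · rw [if_neg hc, if_pos (by omega)]
      simp [List.sum_append]

-- ===== VERDICT (by name: the statement is the Claim_ definition above) =====
theorem balance_sorted_spec : Claim_equal_balance_sorted := by
  intro sorted_list _ hpre
  unfold Pre_balance_sorted at hpre
  unfold Spec_balance_sorted balance_sorted_alt
  have ⟨m, hm⟩ : ∃ m, sorted_list.length = 2 * m :=
    ⟨sorted_list.length / 2, by omega⟩
  rw [core_eq m sorted_list hm]
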